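-- pv_equiv track=rewrite | github.com/efskaar/100-days-of-python-code | 025pathsInGraph.py | recursiveUndirectedHasPath
-- ===== SOURCE A (Python) =====
-- def edgesToGraph(edges):
--   graph = {}
--   for edge in edges:
--     v1,v2 = edge
--     graph[v1] = [] if v1 not in graph.keys() else graph[v1]
--     graph[v2] = [] if v2 not in graph.keys() else graph[v2]
--     graph[v1].append(v2)
--     graph[v2].append(v1)
--   return graph
--
-- def recursiveUndirectedHasPath(edges):
--   graph = edgesToGraph(edges)
--   paths = []
--   visited = []
--   for vertice in graph.keys():
--     if vertice not in visited:
--       visited.append(vertice)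
--       paths.append(depthRecursivHasPath(graph,vertice,[vertice],visited))
--   return paths
--
-- def depthRecursivHasPath(graph,current,path,visited):
--   if len(graph[current]) > 0:
--     for vertice in graph[current][::-1]:
--       if vertice not in path:
--         visited.append(vertice)
--         path.append(vertice)
--         depthRecursivHasPath(graph,vertice,path,visited)
--   return path
-- ===== SOURCE B (Python) =====
-- def recursiveUndirectedHasPath(edges):
--     graph = {}
--     for v1, v2 in edges:
--         graph[v1] = graph.get(v1, []) + [v2]
--         graph[v2] = graph.get(v2, []) + [v1]
--     paths = []
--     visited = []
--     for v in graph: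
--         if v not in visited:
--             visited.append(v)
--             path = [v]
--             stack = [iter(reversed(graph[v]))]
--             while stack:
--                 for u in stack[-1]:
--                     if u not in path:
--                         visited.append(u)
--                         path.append(u)
--                         stack.append(iter(reversed(graph[u])))
--                         break
--                 else:
--                     stack.pop()
--             paths.append(path)
--     return paths
-- ===== Notes on version B (the rewrite author's own statement) =====
-- stated objective: alternative
-- what changed: The recursive DFS helper (depthRecursivHasPath) is replaced by an explicit-stack iterative DFS over iterators of reversed adjacency lists, and the graph is built with get-concat-assign instead of the ensure-key-then-append two-step; discovery order and membership checks are preserved exactly.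
import Mathlib
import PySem

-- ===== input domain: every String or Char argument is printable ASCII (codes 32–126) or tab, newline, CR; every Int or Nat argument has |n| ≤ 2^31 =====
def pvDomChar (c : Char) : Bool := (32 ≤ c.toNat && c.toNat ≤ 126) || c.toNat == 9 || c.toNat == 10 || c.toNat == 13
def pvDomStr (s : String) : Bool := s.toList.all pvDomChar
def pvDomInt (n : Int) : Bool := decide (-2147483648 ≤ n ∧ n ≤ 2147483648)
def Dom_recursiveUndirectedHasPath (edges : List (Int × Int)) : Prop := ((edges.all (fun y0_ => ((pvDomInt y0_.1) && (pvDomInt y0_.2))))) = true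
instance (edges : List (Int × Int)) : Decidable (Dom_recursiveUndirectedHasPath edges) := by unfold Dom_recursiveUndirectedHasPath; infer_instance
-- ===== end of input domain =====

-- B replaces A's recursive DFS by an explicit-stack DFS (same discovery order); objective: alternative decomposition, same cost.
-- The Python helper depthRecursivHasPath mutates `path`/`visited` in place; both ports thread that state as a pair (return value proved equal).
-- The Nat fuel in each port is only a totality guard: it always exceeds the real recursion depth / number of stack steps.

-- ===== PORT A =====
def edgesToGraph (edges : List (Int × Int)) : PySem.Dict Int (List Int) :=
  edges.foldl (fun graph edge =>
    let v1 := edge.1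
    let v2 := edge.2
    let graph := graph.insert v1 (if v1 ∈ graph.keys then graph.getD v1 [] else [])
    let graph := graph.insert v2 (if v2 ∈ graph.keys then graph.getD v2 [] else [])
    let graph := graph.modify v1 [] (fun l => l ++ [v2])
    let graph := graph.modify v2 [] (fun l => l ++ [v1])
    graph) PySem.Dict.empty

-- depthRecursivHasPath; pv = (path, visited); graph[current] via getD (current is always a key)
def dfsA (fuel : Nat) (g : PySem.Dict Int (List Int)) (current : Int)
    (pv : List Int × List Int) : List Int × List Int :=
  match fuel with
  | 0 => pv
  | f + 1 =>
    if 0 < (g.getD current []).length then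
      ((g.getD current []).reverse).foldl (fun pv u =>
        if u ∈ pv.1 then pv
        else dfsA f g u (pv.1 ++ [u], pv.2 ++ [u])) pv
    else pv

def recursiveUndirectedHasPath (edges : List (Int × Int)) : List (List Int) :=
  let graph := edgesToGraph edges
  (graph.keys.foldl (fun (st : List (List Int) × List Int) v =>
      if v ∈ st.2 then st
      else
        let r := dfsA (graph.keys.length + 1) graph v ([v], st.2 ++ [v])
        (st.1 ++ [r.1], r.2)) ([], [])).1

-- ===== PORT B =====
def buildGraph (edges : List (Int × Int)) : PySem.Dict Int (List Int) :=
  edges.foldl (fun g e =>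
    let g1 := g.insert e.1 (g.getD e.1 [] ++ [e.2])
    g1.insert e.2 (g1.getD e.2 [] ++ [e.1])) PySem.Dict.empty

-- explicit-stack DFS: the stack holds the not-yet-consumed part of each frame's reversed neighbour list
mutual
def scanB (f : Nat) (g : PySem.Dict Int (List Int)) (ns : List Int)
    (rest : List (List Int)) (path visited : List Int) : List Int × List Int :=
  match ns with
  | [] => runB f g rest path visited
  | u :: us =>
    if u ∈ path then scanB f g us rest path visited
    else runB f g ((g.getD u []).reverse :: us :: rest) (path ++ [u]) (visited ++ [u])
termination_by (f, ns.length + 1)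
def runB (f : Nat) (g : PySem.Dict Int (List Int)) (stack : List (List Int))
    (path visited : List Int) : List Int × List Int :=
  match stack with
  | [] => (path, visited)
  | ns :: rest =>
    match f with
    | 0 => (path, visited)
    | f' + 1 => scanB f' g ns rest path visited
termination_by (f, 0)
end

def recursiveUndirectedHasPath_alt (edges : List (Int × Int)) : List (List Int) :=
  let g := buildGraph edges
  (g.keys.foldl (fun (st : List (List Int) × List Int) v =>
      if v ∈ st.2 then st
      else
        let r := runB (2 * g.keys.length + 2) g [(g.getD v []).reverse] [v] (st.2 ++ [v])
        (st.1 ++ [r.1], r.2)) ([], [])).1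

-- ===== PRECONDITION & SPEC =====
def Spec_recursiveUndirectedHasPath (edges : List (Int × Int)) (out : List (List Int)) : Prop := out = recursiveUndirectedHasPath_alt edges
instance (edges : List (Int × Int)) (out : List (List Int)) : Decidable (Spec_recursiveUndirectedHasPath edges out) := by unfold Spec_recursiveUndirectedHasPath; infer_instance

-- ===== CLAIM (what is proved, stated in full; the proofs are below) =====
def Claim_equal_recursiveUndirectedHasPath : Prop := ∀ (edges : List (Int × Int)), Dom_recursiveUndirectedHasPath edges → Spec_recursiveUndirectedHasPath edges (recursiveUndirectedHasPath edges)

-- ===== LEMMAS AND PROOFS =====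

-- the adjacency form of A's inner for-loop
def stepA (f : Nat) (g : PySem.Dict Int (List Int)) :
    (List Int × List Int) → Int → List Int × List Int := fun pv u =>
  if u ∈ pv.1 then pv else dfsA f g u (pv.1 ++ [u], pv.2 ++ [u])

def foldNs (f : Nat) (g : PySem.Dict Int (List Int)) (ns : List Int)
    (pv : List Int × List Int) : List Int × List Int := ns.foldl (stepA f g) pv

-- every value occurring in an adjacency list is itself a key
def ClosedG (g : PySem.Dict Int (List Int)) : Prop :=
  ∀ k x : Int, x ∈ g.getD k [] → x ∈ g.keys

lemma dfsA_succ (f : Nat) (g : PySem.Dict Int (List Int)) (c : Int) (pv : List Int × List Int) :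
    dfsA (f + 1) g c pv = foldNs f g ((g.getD c []).reverse) pv := by
  show (if 0 < (g.getD c []).length then
      ((g.getD c []).reverse).foldl (stepA f g) pv else pv) = _
  rcases h : g.getD c [] with _ | ⟨x, xs⟩ <;> simp [foldNs]

lemma foldNs_cons_mem {f : Nat} {g : PySem.Dict Int (List Int)} {u : Int} {us : List Int}
    {pv : List Int × List Int} (h : u ∈ pv.1) :
    foldNs f g (u :: us) pv = foldNs f g us pv := by
  simp [foldNs, List.foldl_cons, stepA, h]

lemma foldNs_cons_fresh {f : Nat} {g : PySem.Dict Int (List Int)} {u : Int} {us : List Int}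
    {pv : List Int × List Int} (h : u ∉ pv.1) :
    foldNs f g (u :: us) pv = foldNs f g us (dfsA f g u (pv.1 ++ [u], pv.2 ++ [u])) := by
  simp [foldNs, List.foldl_cons, stepA, h]

-- shape: the DFS only appends, and appends the same fresh keys to path and visited
lemma foldNs_shape_of (g : PySem.Dict Int (List Int)) (_hg : ClosedG g) (f : Nat)
    (hd : ∀ c p vis, p.Nodup → ∃ δ, dfsA f g c (p, vis) = (p ++ δ, vis ++ δ) ∧
          (∀ x ∈ δ, x ∈ g.keys) ∧ (p ++ δ).Nodup) :
    ∀ ns, (∀ x ∈ ns, x ∈ g.keys) → ∀ p vis, p.Nodup →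
      ∃ δ, foldNs f g ns (p, vis) = (p ++ δ, vis ++ δ) ∧
          (∀ x ∈ δ, x ∈ g.keys) ∧ (p ++ δ).Nodup := by
  intro ns hns
  induction ns with
  | nil => intro p vis hp; exact ⟨[], by simp [foldNs], by simp, by simpa using hp⟩
  | cons u us ih =>
    intro p vis hp
    have hu : u ∈ g.keys := hns u (by simp)
    have hus : ∀ x ∈ us, x ∈ g.keys := fun x hx => hns x (by simp [hx])
    by_cases hmem : u ∈ p
    · rw [foldNs_cons_mem (pv := (p, vis)) hmem]
      exact ih hus p vis hp
    · rw [foldNs_cons_fresh (pv := (p, vis)) hmem]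
      have hnd1 : (p ++ [u]).Nodup := by
        simp only [List.nodup_append, List.nodup_cons, List.nodup_nil, and_true]
        exact ⟨hp, by simpa [eq_comm] using fun a ha (h : a = u) => hmem (h ▸ ha)⟩
      obtain ⟨δ1, he1, hk1, hn1⟩ := hd u (p ++ [u]) (vis ++ [u]) hnd1
      rw [he1]
      obtain ⟨δ2, he2, hk2, hn2⟩ := ih hus (p ++ [u] ++ δ1) (vis ++ [u] ++ δ1) hn1
      refine ⟨[u] ++ δ1 ++ δ2, ?_, ?_, ?_⟩
      · rw [he2]; simp
      · intro x hx
        rcases List.mem_append.1 hx with hx | hx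
        · rcases List.mem_append.1 hx with hx | hx
          · simp at hx; subst hx; exact hu
          · exact hk1 x hx
        · exact hk2 x hx
      · simpa [List.append_assoc] using hn2

lemma dfsA_shape (g : PySem.Dict Int (List Int)) (hg : ClosedG g) :
    ∀ f c p vis, p.Nodup → ∃ δ, dfsA f g c (p, vis) = (p ++ δ, vis ++ δ) ∧
      (∀ x ∈ δ, x ∈ g.keys) ∧ (p ++ δ).Nodup := by
  intro f
  induction f with
  | zero => intro c p vis hp; exact ⟨[], by simp [dfsA], by simp, by simpa using hp⟩
  | succ f ih =>
    intro c p vis hp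
    rw [dfsA_succ]
    exact foldNs_shape_of g hg f ih ((g.getD c []).reverse)
      (fun x hx => hg c x (List.mem_reverse.1 hx)) p vis hp

lemma foldNs_shape (g : PySem.Dict Int (List Int)) (hg : ClosedG g) (f : Nat) :
    ∀ ns, (∀ x ∈ ns, x ∈ g.keys) → ∀ p vis, p.Nodup →
      ∃ δ, foldNs f g ns (p, vis) = (p ++ δ, vis ++ δ) ∧
        (∀ x ∈ δ, x ∈ g.keys) ∧ (p ++ δ).Nodup :=
  foldNs_shape_of g hg f (dfsA_shape g hg f)

-- fuel stability on A's side
lemma stabA (g : PySem.Dict Int (List Int)) (hg : ClosedG g) :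
    ∀ m : Nat,
      (∀ f1 f2 c p vis, m ≤ f1 → m ≤ f2 → p.Nodup → (∀ x ∈ p, x ∈ g.keys) →
        g.keys.length + 1 - p.length ≤ m →
        dfsA f1 g c (p, vis) = dfsA f2 g c (p, vis))
      ∧ (∀ f1 f2 ns p vis, m ≤ f1 → m ≤ f2 → p.Nodup → (∀ x ∈ p, x ∈ g.keys) →
        (∀ x ∈ ns, x ∈ g.keys) → g.keys.length - p.length ≤ m →
        foldNs f1 g ns (p, vis) = foldNs f2 g ns (p, vis)) := by
  intro m
  induction m with
  | zero =>
    constructor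
    · intro f1 f2 c p vis _ _ hp hpk hb
      have := ((hp.subperm hpk).length_le)
      omega
    · intro f1 f2 ns p vis _ _ hp hpk hns hb
      have hlen : g.keys.length ≤ p.length := by omega
      have hfull : ∀ u ∈ g.keys, u ∈ p :=
        fun u hu => ((hp.subperm hpk).perm_of_length_le hlen).mem_iff.mpr hu
      clear hb
      induction ns with
      | nil => rfl
      | cons u us ihns =>
        have hup : u ∈ p := hfull u (hns u (by simp))
        rw [foldNs_cons_mem (pv := (p, vis)) hup, foldNs_cons_mem (pv := (p, vis)) hup]
        exact ihns (fun x hx => hns x (by simp [hx]))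
  | succ m ihm =>
    have hdfs : ∀ f1 f2 c p vis, m + 1 ≤ f1 → m + 1 ≤ f2 → p.Nodup → (∀ x ∈ p, x ∈ g.keys) →
        g.keys.length + 1 - p.length ≤ m + 1 →
        dfsA f1 g c (p, vis) = dfsA f2 g c (p, vis) := by
      intro f1 f2 c p vis h1 h2 hp hpk hb
      obtain ⟨a, rfl⟩ : ∃ a, f1 = a + 1 := ⟨f1 - 1, by omega⟩
      obtain ⟨b, rfl⟩ : ∃ b, f2 = b + 1 := ⟨f2 - 1, by omega⟩
      rw [dfsA_succ, dfsA_succ]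
      exact ihm.2 a b _ p vis (by omega) (by omega) hp hpk
        (fun x hx => hg c x (List.mem_reverse.1 hx)) (by omega)
    refine ⟨hdfs, ?_⟩
    intro f1 f2 ns p vis h1 h2 hp hpk hns hb
    induction ns generalizing p vis with
    | nil => rfl
    | cons u us ihns =>
      have hu : u ∈ g.keys := hns u (by simp)
      have hus : ∀ x ∈ us, x ∈ g.keys := fun x hx => hns x (by simp [hx])
      by_cases hmem : u ∈ p
      · rw [foldNs_cons_mem (pv := (p, vis)) hmem, foldNs_cons_mem (pv := (p, vis)) hmem]
        exact ihns p vis hp hpk hus hb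
      · rw [foldNs_cons_fresh (pv := (p, vis)) hmem, foldNs_cons_fresh (pv := (p, vis)) hmem]
        have hnd1 : (p ++ [u]).Nodup := by
          simp only [List.nodup_append, List.nodup_cons, List.nodup_nil, and_true]
          exact ⟨hp, by simpa [eq_comm] using fun a ha (h : a = u) => hmem (h ▸ ha)⟩
        have hpk1 : ∀ x ∈ p ++ [u], x ∈ g.keys := by
          intro x hx; rcases List.mem_append.1 hx with hx | hx
          · exact hpk x hx
          · simp at hx; subst hx; exact hu
        have hrec : dfsA f1 g u (p ++ [u], vis ++ [u]) = dfsA f2 g u (p ++ [u], vis ++ [u]) := by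
          apply hdfs f1 f2 u _ _ h1 h2 hnd1 hpk1
          have := (hnd1.subperm hpk1).length_le
          simp at this ⊢
          omega
        rw [hrec]
        obtain ⟨δ, he, hk, hn⟩ := dfsA_shape g hg f2 u (p ++ [u]) (vis ++ [u]) hnd1
        rw [he]
        refine ihns _ _ hn ?_ hus ?_
        · intro x hx
          rcases List.mem_append.1 hx with hx | hx
          · exact hpk1 x hx
          · exact hk x hx
        · have : p.length ≤ (p ++ [u] ++ δ).length := by simp
          omega

lemma foldNs_stab (g : PySem.Dict Int (List Int)) (hg : ClosedG g)
    (f1 f2 : Nat) (ns p vis : List Int) (hp : p.Nodup) (hpk : ∀ x ∈ p, x ∈ g.keys)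
    (hns : ∀ x ∈ ns, x ∈ g.keys)
    (h1 : g.keys.length - p.length ≤ f1) (h2 : g.keys.length - p.length ≤ f2) :
    foldNs f1 g ns (p, vis) = foldNs f2 g ns (p, vis) :=
  (stabA g hg (g.keys.length - p.length)).2 f1 f2 ns p vis h1 h2 hp hpk hns (le_refl _)

lemma runB_nil (f : Nat) (g : PySem.Dict Int (List Int)) (p vis : List Int) :
    runB f g [] p vis = (p, vis) := by cases f <;> simp [runB]

lemma runB_cons (f : Nat) (g : PySem.Dict Int (List Int)) (ns : List Int)
    (rest : List (List Int)) (p vis : List Int) :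
    runB (f + 1) g (ns :: rest) p vis = scanB f g ns rest p vis := by simp [runB]

lemma scanB_nil (f : Nat) (g : PySem.Dict Int (List Int)) (rest : List (List Int))
    (p vis : List Int) : scanB f g [] rest p vis = runB f g rest p vis := by simp [scanB]

lemma scanB_cons_mem {f : Nat} {g : PySem.Dict Int (List Int)} {u : Int} {us : List Int}
    {rest : List (List Int)} {p vis : List Int} (h : u ∈ p) :
    scanB f g (u :: us) rest p vis = scanB f g us rest p vis := by simp [scanB, h]

lemma scanB_cons_fresh {f : Nat} {g : PySem.Dict Int (List Int)} {u : Int} {us : List Int}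
    {rest : List (List Int)} {p vis : List Int} (h : u ∉ p) :
    scanB f g (u :: us) rest p vis
      = runB f g ((g.getD u []).reverse :: us :: rest) (p ++ [u]) (vis ++ [u]) := by
  simp [scanB, h]

-- fuel stability on B's side
lemma stabB (g : PySem.Dict Int (List Int)) (hg : ClosedG g) :
    ∀ m : Nat,
      (∀ f1 f2 stack p vis, m ≤ f1 → m ≤ f2 → p.Nodup → (∀ x ∈ p, x ∈ g.keys) →
        (∀ fr ∈ stack, ∀ x ∈ fr, x ∈ g.keys) →
        stack.length + 2 * (g.keys.length + 1 - p.length) ≤ m →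
        runB f1 g stack p vis = runB f2 g stack p vis)
      ∧ (∀ f1 f2 ns rest p vis, m ≤ f1 → m ≤ f2 → p.Nodup → (∀ x ∈ p, x ∈ g.keys) →
        (∀ x ∈ ns, x ∈ g.keys) → (∀ fr ∈ rest, ∀ x ∈ fr, x ∈ g.keys) →
        rest.length + 2 * (g.keys.length + 1 - p.length) ≤ m →
        scanB f1 g ns rest p vis = scanB f2 g ns rest p vis) := by
  intro m
  induction m with
  | zero =>
    constructor
    · intro f1 f2 stack p vis _ _ hp hpk _ hb
      have := (hp.subperm hpk).length_le
      match stack with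
      | [] => rw [runB_nil, runB_nil]
      | ns :: rest => simp at hb
    · intro f1 f2 ns rest p vis _ _ hp hpk _ _ hb
      have := (hp.subperm hpk).length_le
      omega
  | succ m ihm =>
    have hrun : ∀ f1 f2 stack p vis, m + 1 ≤ f1 → m + 1 ≤ f2 → p.Nodup →
        (∀ x ∈ p, x ∈ g.keys) → (∀ fr ∈ stack, ∀ x ∈ fr, x ∈ g.keys) →
        stack.length + 2 * (g.keys.length + 1 - p.length) ≤ m + 1 →
        runB f1 g stack p vis = runB f2 g stack p vis := by
      intro f1 f2 stack p vis h1 h2 hp hpk hst hb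
      match stack with
      | [] => rw [runB_nil, runB_nil]
      | ns :: rest =>
        obtain ⟨a, rfl⟩ : ∃ a, f1 = a + 1 := ⟨f1 - 1, by omega⟩
        obtain ⟨b, rfl⟩ : ∃ b, f2 = b + 1 := ⟨f2 - 1, by omega⟩
        rw [runB_cons, runB_cons]
        refine ihm.2 a b ns rest p vis (by omega) (by omega) hp hpk
          (hst ns (by simp)) (fun fr hfr => hst fr (by simp [hfr])) ?_
        simp at hb; omega
    refine ⟨hrun, ?_⟩
    intro f1 f2 ns rest p vis h1 h2 hp hpk hns hrest hb
    induction ns with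
    | nil =>
      rw [scanB_nil, scanB_nil]
      exact hrun f1 f2 rest p vis h1 h2 hp hpk hrest (by omega)
    | cons u us ihns =>
      have hu : u ∈ g.keys := hns u (by simp)
      have hus : ∀ x ∈ us, x ∈ g.keys := fun x hx => hns x (by simp [hx])
      by_cases hmem : u ∈ p
      · rw [scanB_cons_mem hmem, scanB_cons_mem hmem]
        exact ihns hus
      · rw [scanB_cons_fresh hmem, scanB_cons_fresh hmem]
        have hplen := (hp.subperm hpk).length_le
        have hnd1 : (p ++ [u]).Nodup := by
          simp only [List.nodup_append, List.nodup_cons, List.nodup_nil, and_true]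
          exact ⟨hp, by simpa [eq_comm] using fun a ha (h : a = u) => hmem (h ▸ ha)⟩
        have hpk1 : ∀ x ∈ p ++ [u], x ∈ g.keys := by
          intro x hx; rcases List.mem_append.1 hx with hx | hx
          · exact hpk x hx
          · simp at hx; subst hx; exact hu
        refine hrun f1 f2 _ _ _ h1 h2 hnd1 hpk1 ?_ ?_
        · intro fr hfr
          rcases List.mem_cons.1 hfr with rfl | hfr
          · exact fun x hx => hg u x (List.mem_reverse.1 hx)
          · rcases List.mem_cons.1 hfr with rfl | hfr
            · exact hus
            · exact hrest fr hfr
        · have := (hnd1.subperm hpk1).length_le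
          simp at this ⊢
          omega

lemma runB_stab (g : PySem.Dict Int (List Int)) (hg : ClosedG g)
    (f1 f2 : Nat) (stack : List (List Int)) (p vis : List Int)
    (hp : p.Nodup) (hpk : ∀ x ∈ p, x ∈ g.keys)
    (hst : ∀ fr ∈ stack, ∀ x ∈ fr, x ∈ g.keys)
    (h1 : stack.length + 2 * (g.keys.length + 1 - p.length) ≤ f1)
    (h2 : stack.length + 2 * (g.keys.length + 1 - p.length) ≤ f2) :
    runB f1 g stack p vis = runB f2 g stack p vis :=
  (stabB g hg (stack.length + 2 * (g.keys.length + 1 - p.length))).1 f1 f2 stack p vis h1 h2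
    hp hpk hst (le_refl _)

-- the stack machine of B simulates A's recursive fold frame by frame
lemma simB (g : PySem.Dict Int (List Int)) (hg : ClosedG g) :
    ∀ n : Nat, ∀ p ns rest vis f1 f2 fA,
      p.Nodup → (∀ x ∈ p, x ∈ g.keys) → (∀ x ∈ ns, x ∈ g.keys) →
      (∀ fr ∈ rest, ∀ x ∈ fr, x ∈ g.keys) →
      g.keys.length + 1 - p.length ≤ n →
      1 + rest.length + 2 * (g.keys.length + 1 - p.length) ≤ f1 →
      rest.length + 2 * (g.keys.length + 1 - (foldNs fA g ns (p, vis)).1.length) ≤ f2 →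
      g.keys.length - p.length ≤ fA →
      runB f1 g (ns :: rest) p vis
        = runB f2 g rest (foldNs fA g ns (p, vis)).1 (foldNs fA g ns (p, vis)).2 := by
  intro n
  induction n with
  | zero =>
    intro p ns rest vis f1 f2 fA hp hpk _ _ hn _ _ _
    have := (hp.subperm hpk).length_le
    omega
  | succ n ihn =>
    intro p ns rest vis f1 f2 fA hp hpk hns hrest hn hf1 hf2 hfA
    induction ns with
    | nil =>
      obtain ⟨a, rfl⟩ : ∃ a, f1 = a + 1 := ⟨f1 - 1, by omega⟩
      rw [runB_cons, scanB_nil]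
      simp only [foldNs, List.foldl_nil] at hf2 ⊢
      exact runB_stab g hg a f2 rest p vis hp hpk hrest (by omega) (by omega)
    | cons u us ihns =>
      have hu : u ∈ g.keys := hns u (by simp)
      have hus : ∀ x ∈ us, x ∈ g.keys := fun x hx => hns x (by simp [hx])
      by_cases hmem : u ∈ p
      · obtain ⟨a, rfl⟩ : ∃ a, f1 = a + 1 := ⟨f1 - 1, by omega⟩
        rw [runB_cons, scanB_cons_mem hmem, ← runB_cons]
        rw [foldNs_cons_mem (pv := (p, vis)) hmem] at hf2 ⊢
        exact ihns hus hf2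
      · -- fresh vertex: push a new frame
        have hplen := (hp.subperm hpk).length_le
        have hnd1 : (p ++ [u]).Nodup := by
          simp only [List.nodup_append, List.nodup_cons, List.nodup_nil, and_true]
          exact ⟨hp, by simpa [eq_comm] using fun a ha (h : a = u) => hmem (h ▸ ha)⟩
        have hpk1 : ∀ x ∈ p ++ [u], x ∈ g.keys := by
          intro x hx; rcases List.mem_append.1 hx with hx | hx
          · exact hpk x hx
          · simp at hx; subst hx; exact hu
        have hplen1 := (hnd1.subperm hpk1).length_le
        simp only [List.length_append, List.length_cons, List.length_nil] at hplen1
        obtain ⟨c, rfl⟩ : ∃ c, fA = c + 1 := ⟨fA - 1, by omega⟩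
        obtain ⟨a, rfl⟩ : ∃ a, f1 = a + 1 := ⟨f1 - 1, by omega⟩
        rw [runB_cons, scanB_cons_fresh hmem]
        have hadj : ∀ x ∈ (g.getD u []).reverse, x ∈ g.keys :=
          fun x hx => hg u x (List.mem_reverse.1 hx)
        -- the value of the recursive exploration of u
        obtain ⟨δ1, he1, hk1, hn1⟩ := foldNs_shape g hg (c + 1) ((g.getD u []).reverse)
          hadj (p ++ [u]) (vis ++ [u]) hnd1
        have hpk2 : ∀ x ∈ p ++ [u] ++ δ1, x ∈ g.keys := by
          intro x hx; rcases List.mem_append.1 hx with hx | hx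
          · exact hpk1 x hx
          · exact hk1 x hx
        have hplen2 := (hn1.subperm hpk2).length_le
        simp only [List.length_append, List.length_cons, List.length_nil] at hplen2
        -- step 1: run the pushed frame to completion
        have step1 := ihn (p ++ [u]) ((g.getD u []).reverse) (us :: rest) (vis ++ [u]) a
          (1 + rest.length + 2 * (g.keys.length + 1 - (p ++ [u] ++ δ1).length)) (c + 1)
          hnd1 hpk1 hadj
          (by intro fr hfr; rcases List.mem_cons.1 hfr with rfl | hfr
              · exact hus
              · exact hrest fr hfr)
          (by (try simp) <;> omega)
          (by (try simp) <;> omega)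
          (by rw [he1]; (try simp) <;> omega)
          (by (try simp) <;> omega)
        rw [he1] at step1
        -- A's recursive call equals that exploration
        have hcall : dfsA (c + 1) g u (p ++ [u], vis ++ [u])
            = (p ++ [u] ++ δ1, vis ++ [u] ++ δ1) := by
          rw [dfsA_succ]
          rw [foldNs_stab g hg c (c + 1) _ _ _ hnd1 hpk1 hadj (by (try simp) <;> omega) (by (try simp) <;> omega)]
          exact he1
        rw [foldNs_cons_fresh (pv := (p, vis)) hmem] at hf2 ⊢
        rw [hcall] at hf2 ⊢
        -- step 2: continue with the remaining neighbours of the old frame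
        have step2 := ihn (p ++ [u] ++ δ1) us rest (vis ++ [u] ++ δ1)
          (1 + rest.length + 2 * (g.keys.length + 1 - (p ++ [u] ++ δ1).length)) f2 (c + 1)
          hn1 hpk2 hus hrest
          (by (try simp at hplen2 ⊢) <;> omega)
          (le_refl _) hf2 (by (try simp) <;> omega)
        rw [step1, step2]

lemma keys_ins_indep (d : PySem.Dict Int (List Int)) (k : Int) (v w : List Int) :
    (d.insert k v).keys = (d.insert k w).keys := by
  by_cases h : d.contains k
  · rw [PySem.Dict.keys_insert_of_contains d v h, PySem.Dict.keys_insert_of_contains d w h]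
  · rw [PySem.Dict.keys_insert_of_not_contains d v (by simpa using h),
        PySem.Dict.keys_insert_of_not_contains d w (by simpa using h)]

lemma keys_ins_congr {d e : PySem.Dict Int (List Int)} (h : d.keys = e.keys) (k : Int)
    (v w : List Int) : (d.insert k v).keys = (e.insert k w).keys := by
  by_cases hc : d.contains k
  · have hc' : e.contains k := by
      rw [PySem.Dict.contains_eq_decide_mem_keys] at hc ⊢; rw [← h]; exact hc
    rw [PySem.Dict.keys_insert_of_contains d v hc, PySem.Dict.keys_insert_of_contains e w hc', h]
  · have hc' : e.contains k = false := by
      rw [PySem.Dict.contains_eq_decide_mem_keys] at hc ⊢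
      rw [← h]; simpa using hc
    rw [PySem.Dict.keys_insert_of_not_contains d v (by simpa using hc),
        PySem.Dict.keys_insert_of_not_contains e w hc', h]

-- A's 'graph[v] = [] if v not in graph.keys() else graph[v]' writes back graph.get(v, [])
lemma keys_insert_mem (d : PySem.Dict Int (List Int)) (k : Int) (v : List Int)
    (h : k ∈ d.keys) : (d.insert k v).keys = d.keys :=
  PySem.Dict.keys_insert_of_contains d v
    (by rw [PySem.Dict.contains_eq_decide_mem_keys]; simpa using h)

lemma guard_redundant (d : PySem.Dict Int (List Int)) (v1 : Int) :
    (if v1 ∈ d.keys then d.getD v1 [] else []) = d.getD v1 [] := by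
  by_cases h : v1 ∈ d.keys
  · simp [h]
  · rw [if_neg h, PySem.Dict.getD_of_not_contains]
    rw [PySem.Dict.contains_eq_decide_mem_keys]
    simpa using h

-- one edge processed: A's ensure-key/append steps and B's get-concat-assign steps build the same dict
lemma step_eq (d : PySem.Dict Int (List Int)) (hnd : d.keys.Nodup) (v1 v2 : Int) :
    ((d.insert v1 (d.getD v1 [] ++ [v2])).insert v2
        ((d.insert v1 (d.getD v1 [] ++ [v2])).getD v2 [] ++ [v1]))
    = ((((d.insert v1 (if v1 ∈ d.keys then d.getD v1 [] else [])).insert v2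
          (if v2 ∈ (d.insert v1 (if v1 ∈ d.keys then d.getD v1 [] else [])).keys then
            (d.insert v1 (if v1 ∈ d.keys then d.getD v1 [] else [])).getD v2 [] else [])).modify
          v1 [] (fun l => l ++ [v2])).modify v2 [] (fun l => l ++ [v1])) := by
  rw [guard_redundant, guard_redundant]
  have hndB : ((d.insert v1 (d.getD v1 [] ++ [v2])).insert v2
      ((d.insert v1 (d.getD v1 [] ++ [v2])).getD v2 [] ++ [v1])).keys.Nodup :=
    PySem.Dict.nodup_keys_insert _ _ _ (PySem.Dict.nodup_keys_insert _ _ _ hnd)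
  have keysEq : ((((d.insert v1 (d.getD v1 [])).insert v2
        ((d.insert v1 (d.getD v1 [])).getD v2 [])).modify v1 [] (fun l => l ++ [v2])).modify
        v2 [] (fun l => l ++ [v1])).keys
      = ((d.insert v1 (d.getD v1 [] ++ [v2])).insert v2
        ((d.insert v1 (d.getD v1 [] ++ [v2])).getD v2 [] ++ [v1])).keys := by
    have hv2A2 : v2 ∈ ((d.insert v1 (d.getD v1 [])).insert v2
        ((d.insert v1 (d.getD v1 [])).getD v2 [])).keys :=
      (PySem.Dict.mem_keys_insert _ _ _ _).2 (Or.inl rfl)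
    have hv1A2 : v1 ∈ ((d.insert v1 (d.getD v1 [])).insert v2
        ((d.insert v1 (d.getD v1 [])).getD v2 [])).keys :=
      (PySem.Dict.mem_keys_insert _ _ _ _).2
        (Or.inr ((PySem.Dict.mem_keys_insert _ _ _ _).2 (Or.inl rfl)))
    have e2 : (((d.insert v1 (d.getD v1 [])).insert v2
        ((d.insert v1 (d.getD v1 [])).getD v2 [])).modify v1 [] (fun l => l ++ [v2])).keys
        = ((d.insert v1 (d.getD v1 [])).insert v2
        ((d.insert v1 (d.getD v1 [])).getD v2 [])).keys := by
      rw [PySem.Dict.keys_modify, keys_insert_mem _ v1 _ hv1A2]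
    have hv2A3 : v2 ∈ (((d.insert v1 (d.getD v1 [])).insert v2
        ((d.insert v1 (d.getD v1 [])).getD v2 [])).modify v1 [] (fun l => l ++ [v2])).keys := by
      rw [e2]; exact hv2A2
    rw [PySem.Dict.keys_modify, keys_insert_mem _ v2 _ hv2A3, e2]
    exact keys_ins_congr (keys_ins_indep d v1 _ _) v2 _ _
  have hndA : ((((d.insert v1 (d.getD v1 [])).insert v2
        ((d.insert v1 (d.getD v1 [])).getD v2 [])).modify v1 [] (fun l => l ++ [v2])).modify
        v2 [] (fun l => l ++ [v1])).keys.Nodup := keysEq ▸ hndB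
  have getDEq : ∀ k : Int,
      ((((d.insert v1 (d.getD v1 [])).insert v2
        ((d.insert v1 (d.getD v1 [])).getD v2 [])).modify v1 [] (fun l => l ++ [v2])).modify
        v2 [] (fun l => l ++ [v1])).getD k []
      = ((d.insert v1 (d.getD v1 [] ++ [v2])).insert v2
        ((d.insert v1 (d.getD v1 [] ++ [v2])).getD v2 [] ++ [v1])).getD k [] := by
    intro k
    simp only [PySem.Dict.getD_modify, PySem.Dict.getD_insert]
    by_cases h1 : k = v1 <;> by_cases h2 : k = v2 <;> by_cases h3 : v2 = v1 <;> simp_all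
  apply PySem.Dict.ext
  rw [PySem.Dict.items_eq_map_keys _ hndA [], PySem.Dict.items_eq_map_keys _ hndB [], keysEq]
  exact (List.map_congr_left (fun k _ => by rw [getDEq k])).symm

-- invariants of B's graph fold: nodup keys and adjacency values that are keys
lemma build_aux : ∀ (edges : List (Int × Int)) (d : PySem.Dict Int (List Int)),
    d.keys.Nodup → (∀ k x : Int, x ∈ d.getD k [] → x ∈ d.keys) →
    (edges.foldl (fun g e =>
        let g1 := g.insert e.1 (g.getD e.1 [] ++ [e.2])
        g1.insert e.2 (g1.getD e.2 [] ++ [e.1])) d).keys.Nodup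
    ∧ (∀ k x : Int, x ∈ (edges.foldl (fun g e =>
        let g1 := g.insert e.1 (g.getD e.1 [] ++ [e.2])
        g1.insert e.2 (g1.getD e.2 [] ++ [e.1])) d).getD k []
        → x ∈ (edges.foldl (fun g e =>
        let g1 := g.insert e.1 (g.getD e.1 [] ++ [e.2])
        g1.insert e.2 (g1.getD e.2 [] ++ [e.1])) d).keys) := by
  intro edges
  induction edges with
  | nil => intro d hnd hcl; exact ⟨hnd, hcl⟩
  | cons e es ih =>
    intro d hnd hcl
    simp only [List.foldl_cons]
    refine ih _ (PySem.Dict.nodup_keys_insert _ _ _ (PySem.Dict.nodup_keys_insert _ _ _ hnd)) ?_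
    intro k x hx
    simp only [PySem.Dict.getD_insert] at hx
    simp only [PySem.Dict.mem_keys_insert]
    have hres : ∀ j : Int, x ∈ d.getD j [] → x = e.2 ∨ x = e.1 ∨ x ∈ d.keys :=
      fun j hj => Or.inr (Or.inr (hcl j x hj))
    split_ifs at hx <;> aesop

lemma buildGraph_closed (edges : List (Int × Int)) : ClosedG (buildGraph edges) := by
  have := build_aux edges PySem.Dict.empty (by rw [PySem.Dict.keys_empty]; exact List.nodup_nil)
    (fun k x hx => by rw [PySem.Dict.getD_empty] at hx; simp at hx)
  exact this.2

-- the two graph-building folds produce the same dict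
lemma graphs_eq (edges : List (Int × Int)) : buildGraph edges = edgesToGraph edges := by
  unfold buildGraph edgesToGraph
  have aux : ∀ (es : List (Int × Int)) (d : PySem.Dict Int (List Int)), d.keys.Nodup →
      es.foldl (fun g e =>
        let g1 := g.insert e.1 (g.getD e.1 [] ++ [e.2])
        g1.insert e.2 (g1.getD e.2 [] ++ [e.1])) d
      = es.foldl (fun graph edge =>
        let v1 := edge.1
        let v2 := edge.2
        let graph := graph.insert v1 (if v1 ∈ graph.keys then graph.getD v1 [] else [])
        let graph := graph.insert v2 (if v2 ∈ graph.keys then graph.getD v2 [] else [])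
        let graph := graph.modify v1 [] (fun l => l ++ [v2])
        let graph := graph.modify v2 [] (fun l => l ++ [v1])
        graph) d := by
    intro es
    induction es with
    | nil => intro d _; rfl
    | cons e es ih =>
      intro d hnd
      simp only [List.foldl_cons]
      rw [← step_eq d hnd e.1 e.2]
      exact ih _ (PySem.Dict.nodup_keys_insert _ _ _ (PySem.Dict.nodup_keys_insert _ _ _ hnd))
  exact aux edges PySem.Dict.empty (by rw [PySem.Dict.keys_empty]; exact List.nodup_nil)

-- outer loops agree
lemma outer_eq (g : PySem.Dict Int (List Int)) (hg : ClosedG g) :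
    ∀ ks : List Int, (∀ v ∈ ks, v ∈ g.keys) → ∀ st : List (List Int) × List Int,
      ks.foldl (fun (st : List (List Int) × List Int) v =>
        if v ∈ st.2 then st
        else
          let r := dfsA (g.keys.length + 1) g v ([v], st.2 ++ [v])
          (st.1 ++ [r.1], r.2)) st
      = ks.foldl (fun (st : List (List Int) × List Int) v =>
        if v ∈ st.2 then st
        else
          let r := runB (2 * g.keys.length + 2) g [(g.getD v []).reverse] [v] (st.2 ++ [v])
          (st.1 ++ [r.1], r.2)) st := by
  intro ks
  induction ks with
  | nil => intro _ st; rfl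
  | cons v ks ih =>
    intro hks st
    have hv : v ∈ g.keys := hks v (by simp)
    have hks' : ∀ x ∈ ks, x ∈ g.keys := fun x hx => hks x (by simp [hx])
    simp only [List.foldl_cons]
    by_cases hmem : v ∈ st.2
    · simp only [if_pos hmem]
      exact ih hks' st
    · simp only [if_neg hmem]
      have key : dfsA (g.keys.length + 1) g v ([v], st.2 ++ [v])
          = runB (2 * g.keys.length + 2) g [(g.getD v []).reverse] [v] (st.2 ++ [v]) := by
        have hsim := simB g hg g.keys.length [v] ((g.getD v []).reverse) [] (st.2 ++ [v])
          (2 * g.keys.length + 2) (2 * g.keys.length + 2) g.keys.length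
          (by simp) (by simpa using hv)
          (fun x hx => hg v x (List.mem_reverse.1 hx))
          (by simp) (by simp) (by (try simp) <;> omega) (by (try simp) <;> omega)
          (by simp)
        rw [runB_nil] at hsim
        rw [dfsA_succ, hsim]
      rw [key]
      exact ih hks' _

-- ===== VERDICT (by name: the statement is the Claim_ definition above) =====
theorem recursiveUndirectedHasPath_spec : Claim_equal_recursiveUndirectedHasPath := by
  intro edges _
  unfold Spec_recursiveUndirectedHasPath recursiveUndirectedHasPath recursiveUndirectedHasPath_alt
  rw [graphs_eq]
  exact congrArg Prod.fst (outer_eq (edgesToGraph edges)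
    (graphs_eq edges ▸ buildGraph_closed edges) (edgesToGraph edges).keys (fun _ h => h) ([], []))
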